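-- pv_equiv track=rewrite | github.com/rosskcoding/ESGvist-Dashboard | backend/app/services/merge_service.py | _collapse_status
-- ===== SOURCE A (Python) =====
-- def _collapse_status(statuses: list[str]) -> str:
--     normalized = [status for status in statuses if status != "not_applicable"]
--     if not normalized:
--         return "missing"
--     if all(status == "complete" for status in normalized):
--         return "complete"
--     if all(status == "missing" for status in normalized):
--         return "missing"
--     return "partial"
-- ===== SOURCE B (Python) =====
-- def _collapse_status(statuses: list[str]) -> str:
--     seen_complete = seen_missing = seen_other = False
--     for status in statuses:
--         if status == "not_applicable":
--             continue
--         elif status == "complete":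
--             seen_complete = True
--         elif status == "missing":
--             seen_missing = True
--         else:
--             seen_other = True
--     if seen_other or (seen_complete and seen_missing):
--         return "partial"
--     if seen_complete:
--         return "complete"
--     return "missing"
-- ===== Notes on version B (the rewrite author's own statement) =====
-- stated objective: alternative
-- what changed: Replaces the filtered-list build plus two all() passes with a single pass over the input maintaining three boolean flags (seen complete / missing / other), deciding the summary from the flags.
import Mathlib
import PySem

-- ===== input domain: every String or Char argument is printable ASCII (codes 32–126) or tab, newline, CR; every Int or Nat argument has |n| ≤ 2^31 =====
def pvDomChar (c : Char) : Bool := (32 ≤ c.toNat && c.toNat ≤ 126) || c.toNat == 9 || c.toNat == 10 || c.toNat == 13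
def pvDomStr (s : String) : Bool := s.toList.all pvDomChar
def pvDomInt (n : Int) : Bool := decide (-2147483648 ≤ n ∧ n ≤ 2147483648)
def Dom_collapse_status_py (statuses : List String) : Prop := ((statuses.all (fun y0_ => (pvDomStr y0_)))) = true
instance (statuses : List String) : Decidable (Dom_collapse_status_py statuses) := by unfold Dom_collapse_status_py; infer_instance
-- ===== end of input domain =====

-- B replaces A's filtered intermediate list and two all() passes by one pass keeping three boolean flags (alternative decomposition, same O(n) cost).

-- ===== PORT A =====
def collapse_status_py (statuses : List String) : String :=
  let normalized := statuses.filter (fun s => !(s == "not_applicable"))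
  if normalized = [] then "missing"
  else if normalized.all (fun s => s == "complete") then "complete"
  else if normalized.all (fun s => s == "missing") then "missing"
  else "partial"

-- ===== PORT B =====
def pvStep (acc : Bool × Bool × Bool) (s : String) : Bool × Bool × Bool :=
  if s == "not_applicable" then acc
  else if s == "complete" then (true, acc.2.1, acc.2.2)
  else if s == "missing" then (acc.1, true, acc.2.2)
  else (acc.1, acc.2.1, true)

def collapse_status_py_alt (statuses : List String) : String :=
  let st := statuses.foldl pvStep (false, false, false)
  if st.2.2 || (st.1 && st.2.1) then "partial"
  else if st.1 then "complete"
  else "missing"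

-- ===== PRECONDITION & SPEC =====
def Spec_collapse_status_py (statuses : List String) (out : String) : Prop := out = collapse_status_py_alt statuses
instance (statuses : List String) (out : String) : Decidable (Spec_collapse_status_py statuses out) := by unfold Spec_collapse_status_py; infer_instance

-- ===== CLAIM (what is proved, stated in full; the proofs are below) =====
def Claim_equal_collapse_status_py : Prop := ∀ (statuses : List String), Dom_collapse_status_py statuses → Spec_collapse_status_py statuses (collapse_status_py statuses)

-- ===== LEMMAS AND PROOFS =====

def pvPc (s : String) : Bool := s == "complete"
def pvPm (s : String) : Bool := s == "missing"
def pvPo (s : String) : Bool := !(s == "not_applicable") && !(s == "complete") && !(s == "missing")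

lemma pv_fold_char (l : List String) : ∀ c m o,
    l.foldl pvStep (c, m, o) = (c || l.any pvPc, m || l.any pvPm, o || l.any pvPo) := by
  induction l with
  | nil => simp
  | cons s t ih =>
    intro c m o
    by_cases h1 : s = "not_applicable" <;> by_cases h2 : s = "complete" <;>
      by_cases h3 : s = "missing"
    all_goals
      first
      | (simp [pvStep, ih, pvPc, pvPm, pvPo, h1, h2, h3]; done)
      | (have hc2 : (s == "complete") = false := beq_eq_false_iff_ne.mpr h2
         have hm2 : (s == "missing") = false := beq_eq_false_iff_ne.mpr h3
         simp [pvStep, ih, pvPc, pvPm, pvPo, h1, hc2, hm2])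

lemma pv_filter_nil (l : List String) :
    (l.filter (fun s => !(s == "not_applicable")) = []) ↔
      (l.any pvPc = false ∧ l.any pvPm = false ∧ l.any pvPo = false) := by
  simp only [List.filter_eq_nil_iff, List.any_eq_false, pvPc, pvPm, pvPo]
  constructor
  · intro h
    refine ⟨fun s hs => ?_, fun s hs => ?_, fun s hs => ?_⟩ <;>
      · have := h s hs; simp at this ⊢; intro hc
        · simp [hc] at this
  · intro ⟨hc, hm, ho⟩ s hs
    have h1 := hc s hs; have h2 := hm s hs; have h3 := ho s hs
    simp at h1 h2 h3 ⊢
    tauto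

lemma pv_all_complete (l : List String) :
    ((l.filter (fun s => !(s == "not_applicable"))).all (fun s => s == "complete") = true) ↔
      (l.any pvPm = false ∧ l.any pvPo = false) := by
  simp only [List.all_eq_true, List.mem_filter, List.any_eq_false, pvPm, pvPo]
  constructor
  · intro h
    refine ⟨fun s hs => ?_, fun s hs => ?_⟩
    · by_cases hm : s = "missing"
      · subst hm; have := h "missing" ⟨hs, by decide⟩; simp at this
      · simp [hm]
    · by_cases hna : s = "not_applicable"
      · simp [hna]
      · have := h s ⟨hs, by simp [hna]⟩
        simp at this; simp [this]
  · intro ⟨hm, ho⟩ s ⟨hs, hna⟩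
    have h2 := hm s hs; have h3 := ho s hs
    simp at hna h2 h3 ⊢
    tauto

lemma pv_all_missing (l : List String) :
    ((l.filter (fun s => !(s == "not_applicable"))).all (fun s => s == "missing") = true) ↔
      (l.any pvPc = false ∧ l.any pvPo = false) := by
  simp only [List.all_eq_true, List.mem_filter, List.any_eq_false, pvPc, pvPo]
  constructor
  · intro h
    refine ⟨fun s hs => ?_, fun s hs => ?_⟩
    · by_cases hc : s = "complete"
      · subst hc; have := h "complete" ⟨hs, by decide⟩; simp at this
      · simp [hc]
    · by_cases hna : s = "not_applicable"
      · simp [hna]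
      · have := h s ⟨hs, by simp [hna]⟩
        simp at this; simp [this]
  · intro ⟨hc, ho⟩ s ⟨hs, hna⟩
    have h2 := hc s hs; have h3 := ho s hs
    simp at hna h2 h3 ⊢
    tauto

-- ===== VERDICT (by name: the statement is the Claim_ definition above) =====
theorem collapse_status_py_spec : Claim_equal_collapse_status_py := by
  intro statuses _
  unfold Spec_collapse_status_py collapse_status_py collapse_status_py_alt
  rw [pv_fold_char]
  cases hC : statuses.any pvPc <;> cases hM : statuses.any pvPm <;> cases hO : statuses.any pvPo <;>
    simp only [Bool.or_false, Bool.or_true, Bool.and_self, Bool.and_false, Bool.and_true] <;>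
    simp only [pv_filter_nil, pv_all_complete, pv_all_missing, hC, hM, hO] <;> simp
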